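-- pv_equiv track=rewrite | github.com/DancingOnAir/LeetcodePythonSolution | Stack/1425_constrained_subsequence_sum.py | constrainedSubsetSum1
-- ===== SOURCE A (Python) =====
-- from typing import List
-- from collections import deque
--
-- def constrainedSubsetSum1(nums: List[int], k: int) -> int:
--     dq = deque()
--
--     for i in range(len(nums)):
--         if dq:
--             nums[i] += dq[0]
--
--         while len(dq) and nums[i] > dq[-1]:
--             dq.pop()
--
--         if nums[i] > 0:
--             dq.append(nums[i])
--
--         if i >= k and dq and dq[0] == nums[i - k]:
--             dq.popleft()
--     return max(nums)
-- ===== SOURCE B (Python) =====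
-- from typing import List
--
-- def constrainedSubsetSum1(nums: List[int], k: int) -> int:
--     for i in range(len(nums)):
--         lo = i - k if i >= k else 0
--         best = 0
--         for j in range(lo, i):
--             if nums[j] > best:
--                 best = nums[j]
--         nums[i] += best
--     return max(nums)
-- ===== Notes on version B (the rewrite author's own statement) =====
-- stated objective: simpler
-- what changed: Replaced the monotonic deque with a direct dp recurrence: for each i, scan the previous min(i,k) dp values for the largest positive one and add it to nums[i]; no auxiliary data structure, no value-based eviction.
-- outside the precondition, e.g. on constrainedSubsetSum1([-5, -3], -1): A returns -3, B returns -3; on constrainedSubsetSum1([1, 2, 3], -1): A raises IndexError, B returns 3; on constrainedSubsetSum1([], 1): A raises ValueError, B raises ValueError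
import Mathlib
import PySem

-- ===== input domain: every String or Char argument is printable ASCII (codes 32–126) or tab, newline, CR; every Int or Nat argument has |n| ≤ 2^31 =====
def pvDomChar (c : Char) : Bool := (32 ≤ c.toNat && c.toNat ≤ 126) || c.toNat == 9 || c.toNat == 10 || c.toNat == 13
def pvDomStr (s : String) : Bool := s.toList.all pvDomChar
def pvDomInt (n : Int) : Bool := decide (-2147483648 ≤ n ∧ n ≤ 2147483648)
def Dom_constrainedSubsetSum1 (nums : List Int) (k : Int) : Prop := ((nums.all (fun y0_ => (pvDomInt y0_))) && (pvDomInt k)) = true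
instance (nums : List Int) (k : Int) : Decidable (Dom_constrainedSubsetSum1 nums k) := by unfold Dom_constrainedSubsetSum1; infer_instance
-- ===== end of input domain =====

-- B replaces A's monotonic deque with a direct scan of the previous min(i,k) dp values (simpler: no
-- auxiliary structure, no value-based eviction). Both A and B mutate `nums` in place into the same
-- dp array; the equivalence proved here is about the return value.

-- ===== PORT A =====
-- `while len(dq) and nums[i] > dq[-1]: dq.pop()` — pop from the RIGHT while the new value exceeds the tail
def csPop (dq : List Int) (v : Int) : List Int :=
  match _h : dq.getLast? with
  | some t => if v > t then csPop dq.dropLast v else dq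
  | none => dq
termination_by dq.length
decreasing_by
  cases dq with
  | nil => simp at _h
  | cons a l => simp


-- one iteration of A's `for i in range(len(nums))` body; state = (nums, dq), head of dq = Python dq[0]
def stepA (k : Int) (st : List Int × List Int) (i : Int) : List Int × List Int :=
  let arr := if st.2 ≠ [] then PySem.List.pySetD st.1 i (PySem.List.pyGetD st.1 i 0 + st.2.headD 0) else st.1
  let v := PySem.List.pyGetD arr i 0
  let dq1 := csPop st.2 v
  let dq2 := if v > 0 then dq1 ++ [v] else dq1
  let dq3 := if i ≥ k ∧ dq2 ≠ [] ∧ dq2.headD 0 = PySem.List.pyGetD arr (i - k) 0 then dq2.tail else dq2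
  (arr, dq3)

def constrainedSubsetSum1 (nums : List Int) (k : Int) : Int :=
  let st := (PySem.List.pyRange 0 (nums.length : Int) 1).foldl (stepA k) (nums, [])
  ((PySem.List.max? st.1 (fun x => x)).getD 0)

-- ===== PORT B =====
-- one iteration of B's outer loop: scan nums[lo:i] for the largest positive dp value, add it to nums[i]
def stepB (k : Int) (arr : List Int) (i : Int) : List Int :=
  let lo := if i ≥ k then i - k else 0
  let best := (PySem.List.pyRange lo i 1).foldl
    (fun b j => if PySem.List.pyGetD arr j 0 > b then PySem.List.pyGetD arr j 0 else b) 0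
  PySem.List.pySetD arr i (PySem.List.pyGetD arr i 0 + best)

def constrainedSubsetSum1_alt (nums : List Int) (k : Int) : Int :=
  let arr := (PySem.List.pyRange 0 (nums.length : Int) 1).foldl (stepB k) nums
  ((PySem.List.max? arr (fun x => x)).getD 0)

-- ===== PRECONDITION & SPEC =====
-- Pre_ excludes empty `nums` (A's max([]) raises ValueError) and negative k, outside the problem's
-- constraint 1 ≤ k: there A's eviction indexes nums[i-k] at future slots past the end of the list
-- and raises IndexError on some inputs (e.g. ([1,2,3], -1)) while returning on others.
def Pre_constrainedSubsetSum1 (nums : List Int) (k : Int) : Prop := nums ≠ [] ∧ 0 ≤ k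
instance (nums : List Int) (k : Int) : Decidable (Pre_constrainedSubsetSum1 nums k) := by
  unfold Pre_constrainedSubsetSum1; infer_instance
def pvWitness_constrainedSubsetSum1 : List Int × Int := ([1, -2, 3], 2)

def Spec_constrainedSubsetSum1 (nums : List Int) (k : Int) (out : Int) : Prop := out = constrainedSubsetSum1_alt nums k
instance (nums : List Int) (k : Int) (out : Int) : Decidable (Spec_constrainedSubsetSum1 nums k out) := by unfold Spec_constrainedSubsetSum1; infer_instance

-- ===== CLAIM (what is proved, stated in full; the proofs are below) =====
def Claim_equal_constrainedSubsetSum1 : Prop := ∀ (nums : List Int) (k : Int), Dom_constrainedSubsetSum1 nums k → Pre_constrainedSubsetSum1 nums k → Spec_constrainedSubsetSum1 nums k (constrainedSubsetSum1 nums k)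

-- ===== LEMMAS AND PROOFS =====

-- the exact content of A's deque after i iterations: those dp values of the current window that are
-- positive and ≥ every later dp value of the window
lemma csPop_nil (v : Int) : csPop [] v = [] := by
  rw [csPop]
  rfl

lemma csPop_append_gt (s : List Int) (t v : Int) (h : v > t) :
    csPop (s ++ [t]) v = csPop s v := by
  rw [csPop]
  split
  next t' heq =>
    rw [List.getLast?_concat] at heq
    cases heq
    rw [if_pos h, List.dropLast_concat]
  next heq => simp at heq

lemma csPop_append_le (s : List Int) (t v : Int) (h : v ≤ t) :
    csPop (s ++ [t]) v = s ++ [t] := by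
  rw [csPop]
  split
  next t' heq =>
    rw [List.getLast?_concat] at heq
    cases heq
    rw [if_neg (by omega)]
  next heq => simp at heq

lemma csPop_cons_ge (x v : Int) (s : List Int) (hv : v ≤ x) : csPop (x :: s) v = x :: csPop s v := by
  induction s using List.reverseRecOn with
  | nil => rw [csPop_nil, show x :: ([] : List Int) = [] ++ [x] by simp, csPop_append_le _ _ _ hv]
  | append_singleton s' t ih =>
    by_cases hvt : v > t
    · rw [show x :: (s' ++ [t]) = (x :: s') ++ [t] by simp, csPop_append_gt _ _ _ hvt,
        csPop_append_gt _ _ _ hvt, ih]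
    · rw [show x :: (s' ++ [t]) = (x :: s') ++ [t] by simp, csPop_append_le _ _ _ (by omega),
        csPop_append_le _ _ _ (by omega)]
      simp

lemma csPop_all_lt (s : List Int) (v : Int) (h : ∀ y ∈ s, y < v) : csPop s v = [] := by
  induction s using List.reverseRecOn with
  | nil => exact csPop_nil v
  | append_singleton s' t ih =>
    rw [csPop_append_gt _ _ _ (h t (by simp))]
    exact ih (fun y hy => h y (by simp [hy]))


def skyline : List Int → List Int
  | [] => []
  | x :: rest => if 0 < x ∧ ∀ y ∈ rest, y ≤ x then x :: skyline rest else skyline rest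

lemma mem_skyline {z : Int} {w : List Int} (h : z ∈ skyline w) : z ∈ w ∧ 0 < z := by
  induction w with
  | nil => simp [skyline] at h
  | cons x rest ih =>
    rw [skyline] at h
    split at h
    · rcases List.mem_cons.mp h with h1 | h1
      · subst h1; exact ⟨List.mem_cons_self, by tauto⟩
      · exact ⟨List.mem_cons_of_mem _ (ih h1).1, (ih h1).2⟩
    · exact ⟨List.mem_cons_of_mem _ (ih h).1, (ih h).2⟩

lemma skyline_head {x : Int} {s w : List Int} (h : skyline w = x :: s) :
    0 < x ∧ ∀ y ∈ w, y ≤ x := by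
  induction w generalizing s with
  | nil => simp [skyline] at h
  | cons z rest ih =>
    rw [skyline] at h
    split at h
    · rename_i hc
      rw [List.cons.injEq] at h
      obtain ⟨rfl, -⟩ := h
      refine ⟨hc.1, fun y hy => ?_⟩
      rcases List.mem_cons.mp hy with rfl | hy
      · exact le_refl _
      · exact hc.2 y hy
    · rename_i hc
      obtain ⟨hx, hall⟩ := ih h
      refine ⟨hx, fun y hy => ?_⟩
      rcases List.mem_cons.mp hy with rfl | hy
      · by_contra hgt
        push Not at hgt
        exact hc ⟨lt_trans hx hgt, fun u hu => le_trans (hall u hu) (le_of_lt hgt)⟩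
      · exact hall y hy

lemma skyline_nil_iff {w : List Int} : skyline w = [] ↔ ∀ y ∈ w, y ≤ 0 := by
  induction w with
  | nil => simp [skyline]
  | cons x rest ih =>
    rw [skyline]
    constructor
    · intro h
      split at h
      · simp at h
      · rename_i hc
        intro y hy
        rcases List.mem_cons.mp hy with rfl | hy
        · by_contra hpos
          push Not at hpos
          exact hc ⟨hpos, fun u hu => le_trans (ih.mp h u hu) (le_of_lt hpos)⟩
        · exact ih.mp h y hy
    · intro h
      have hx : x ≤ 0 := h x List.mem_cons_self
      rw [if_neg (by rintro ⟨h1, -⟩; omega)]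
      exact ih.mpr (fun y hy => h y (List.mem_cons_of_mem _ hy))

lemma skyline_push (w : List Int) (v : Int) :
    csPop (skyline w) v ++ (if v > 0 then [v] else []) = skyline (w ++ [v]) := by
  induction w with
  | nil =>
    simp only [skyline, List.nil_append]
    rw [csPop_nil]
    by_cases h : 0 < v <;> simp [h]
  | cons x rest ih =>
    rw [List.cons_append, skyline, skyline]
    by_cases hc : 0 < x ∧ ∀ y ∈ rest, y ≤ x
    · by_cases hvx : v ≤ x
      · have hc2 : 0 < x ∧ ∀ y ∈ rest ++ [v], y ≤ x := by
          refine ⟨hc.1, fun y hy => ?_⟩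
          rcases List.mem_append.mp hy with hy | hy
          · exact hc.2 y hy
          · simp at hy; omega
        rw [if_pos hc, if_pos hc2, csPop_cons_ge _ _ _ hvx, List.cons_append, ih]
      · have hc2 : ¬ (0 < x ∧ ∀ y ∈ rest ++ [v], y ≤ x) := fun h2 => hvx (h2.2 v (by simp))
        rw [if_pos hc, if_neg hc2, ← ih]
        have h1 : csPop (x :: skyline rest) v = [] := by
          apply csPop_all_lt
          intro y hy
          rcases List.mem_cons.mp hy with rfl | hy
          · omega
          · have := hc.2 _ (mem_skyline hy).1; omega
        have h2 : csPop (skyline rest) v = [] := by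
          apply csPop_all_lt
          intro y hy
          have := hc.2 _ (mem_skyline hy).1; omega
        rw [h1, h2]
    · have hc2 : ¬ (0 < x ∧ ∀ y ∈ rest ++ [v], y ≤ x) := by
        intro h2
        exact hc ⟨h2.1, fun y hy => h2.2 y (List.mem_append_left _ hy)⟩
      rw [if_neg hc, if_neg hc2, ih]

lemma skyline_evict (e : Int) (w' : List Int) :
    (if skyline (e :: w') ≠ [] ∧ (skyline (e :: w')).headD 0 = e
      then (skyline (e :: w')).tail else skyline (e :: w')) = skyline w' := by
  rw [skyline]
  by_cases hc : 0 < e ∧ ∀ y ∈ w', y ≤ e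
  · rw [if_pos hc]
    simp
  · rw [if_neg hc]
    rcases hs : skyline w' with _ | ⟨x, s⟩
    · simp
    · have hne : ¬ ((x :: s) ≠ [] ∧ (x :: s).headD 0 = e) := by
        rintro ⟨-, hhd⟩
        simp only [List.headD_cons] at hhd
        obtain ⟨hx, hall⟩ := skyline_head hs
        exact hc (by rw [← hhd]; exact ⟨hx, hall⟩)
      rw [if_neg hne]

lemma skyline_best (w : List Int) :
    (if skyline w ≠ [] then (skyline w).headD 0 else 0)
      = w.foldl (fun b y => if y > b then y else b) 0 := by
  have hmax : w.foldl (fun b y => if y > b then y else b) 0 = w.foldl max 0 := by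
    apply PySem.List.foldl_congr_mem
    intro b y _
    rw [max_def]
    split <;> split <;> omega
  rw [hmax]
  rcases hs : skyline w with _ | ⟨x, s⟩
  · rw [if_neg (by simp)]
    have hall := skyline_nil_iff.mp hs
    rcases PySem.List.foldl_max_mem w 0 with h | h
    · omega
    · have h2 := (PySem.List.le_foldl_max w 0).1
      have := hall _ h
      omega
  · rw [if_pos (by simp)]
    simp only [List.headD_cons]
    have hxw : x ∈ w := (mem_skyline (hs ▸ List.mem_cons_self)).1
    obtain ⟨hx0, hall⟩ := skyline_head hs
    have hle := (PySem.List.le_foldl_max w 0).2 x hxw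
    rcases PySem.List.foldl_max_mem w 0 with h | h
    · omega
    · have := hall _ h
      omega

lemma stepB_spec (k : Int) (hk : 0 ≤ k) (a : List Int) (m : Nat) (hm : m < a.length) :
    stepB k a (m : Int)
      = a.set m (a[m] + ((a.take m).drop (m - k.toNat)).foldl (fun b y => if y > b then y else b) 0) := by
  unfold stepB
  dsimp only
  set lo : Int := if (m : Int) ≥ k then (m : Int) - k else 0 with hlo
  have hlo0 : 0 ≤ lo := by rw [hlo]; split <;> omega
  have hlotn : lo.toNat = m - k.toNat := by rw [hlo]; split <;> omega
  have hfold : (PySem.List.pyRange lo (m : Int) 1).foldl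
      (fun b j => if PySem.List.pyGetD a j 0 > b then PySem.List.pyGetD a j 0 else b) 0
      = ((a.take m).drop (m - k.toNat)).foldl (fun b y => if y > b then y else b) 0 := by
    have hlen : ((a.take m).length : Int) = (m : Int) := by
      simp; omega
    have hcongr : (PySem.List.pyRange lo (m : Int) 1).foldl
        (fun b j => if PySem.List.pyGetD a j 0 > b then PySem.List.pyGetD a j 0 else b) 0
        = (PySem.List.pyRange lo (m : Int) 1).foldl
        (fun b j => if PySem.List.pyGetD (a.take m) j 0 > b then PySem.List.pyGetD (a.take m) j 0 else b) 0 := by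
      apply PySem.List.foldl_congr_mem
      intro b j hj
      rw [PySem.List.mem_pyRange_one] at hj
      have h0j : 0 ≤ j := le_trans hlo0 hj.1
      have hjm : j < (m : Int) := hj.2
      have : PySem.List.pyGetD a j 0 = PySem.List.pyGetD (a.take m) j 0 := by
        rw [PySem.List.pyGetD_eq_getElem a 0 h0j (by omega),
            PySem.List.pyGetD_eq_getElem (a.take m) 0 h0j (by rw [hlen]; omega),
            List.getElem_take]
      rw [this]
    rw [hcongr, ← hlen,
      PySem.List.foldl_pyRange_pyGetD' (a.take m) 0 (fun b y => if y > b then y else b) 0 hlo0,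
      hlotn]
  rw [hfold]
  have harr : PySem.List.pySetD a (m : Int)
      (PySem.List.pyGetD a (m : Int) 0 + ((a.take m).drop (m - k.toNat)).foldl (fun b y => if y > b then y else b) 0)
      = a.set m (a[m] + ((a.take m).drop (m - k.toNat)).foldl (fun b y => if y > b then y else b) 0) := by
    rw [PySem.List.pyGetD_eq_getElem a 0 (by omega) (by omega)]
    simp [PySem.List.pySetD, PySem.List.pySet?_natCast a m _ hm]
  rw [harr]

-- one loop iteration, k = 0: both sides reduce to setting nums[i] unchanged
lemma step_eq_zero (a dq : List Int) (m : Nat) (hm : m < a.length)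
    (hdq : dq = skyline ((a.take m).drop (m - (0:Int).toNat))) :
    stepA 0 (a, dq) (m : Int)
      = (stepB 0 a (m : Int),
         skyline (((stepB 0 a (m : Int)).take (m + 1)).drop (m + 1 - (0:Int).toNat))) := by
  -- k = 0: the window is always empty, the deque is always empty at the top of the loop,
  -- and the element appended at step i (if any) is evicted in the same iteration
  have hwin : (a.take m).drop (m - (0:Int).toNat) = [] :=
    List.drop_eq_nil_of_le (by simp)
  rw [hwin] at hdq
  have hdqnil : dq = [] := by simpa [skyline] using hdq
  subst hdqnil
  have hwin1 : (a.take (m+1)).drop (m + 1 - (0:Int).toNat) = [] :=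
    List.drop_eq_nil_of_le (by simp)
  rw [stepB_spec 0 le_rfl a m hm, hwin]
  simp only [List.foldl_nil, add_zero, List.set_getElem_self hm]
  unfold stepA
  dsimp only
  rw [if_neg (by simp), csPop_nil, sub_zero, hwin1]
  set v := PySem.List.pyGetD a (m : Int) 0 with hv
  by_cases hv0 : v > 0
  · rw [if_pos hv0, if_pos ⟨by omega, by simp, by simp⟩]
    simp [skyline]
  · rw [if_neg hv0, if_neg (by rintro ⟨-, h2, -⟩; exact h2 rfl)]
    simp [skyline]

-- one loop iteration, 1 ≤ k: A's state step produces B's array together with the skyline of the new window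
lemma step_eq (k : Int) (hk : 1 ≤ k) (a dq : List Int) (m : Nat) (hm : m < a.length)
    (hdq : dq = skyline ((a.take m).drop (m - k.toNat))) :
    stepA k (a, dq) (m : Int)
      = (stepB k a (m : Int),
         skyline (((stepB k a (m : Int)).take (m + 1)).drop (m + 1 - k.toNat))) := by
  rw [stepB_spec k (by omega) a m hm]
  set F := ((a.take m).drop (m - k.toNat)).foldl (fun b y => if y > b then y else b) 0 with hF
  have hbest := skyline_best ((a.take m).drop (m - k.toNat))
  rw [← hF] at hbest
  unfold stepA
  dsimp only
  have harr : (if dq ≠ [] then PySem.List.pySetD a (m : Int) (PySem.List.pyGetD a (m : Int) 0 + dq.headD 0) else a)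
      = a.set m (a[m] + F) := by
    by_cases hdqe : dq = []
    · rw [if_neg (by simp [hdqe])]
      have hsk : skyline ((a.take m).drop (m - k.toNat)) = [] := hdqe ▸ hdq.symm
      rw [if_neg (by simp [hsk])] at hbest
      rw [← hbest, add_zero, List.set_getElem_self hm]
    · rw [if_pos hdqe]
      have hsk : skyline ((a.take m).drop (m - k.toNat)) ≠ [] := hdq ▸ hdqe
      rw [if_pos hsk] at hbest
      rw [PySem.List.pyGetD_eq_getElem a 0 (by omega) (by exact_mod_cast hm)]
      rw [hdq, hbest]
      simp [PySem.List.pySetD, PySem.List.pySet?_natCast a m _ hm]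
  rw [harr]
  have hv : PySem.List.pyGetD (a.set m (a[m] + F)) (m : Int) 0 = a[m] + F := by
    rw [PySem.List.pyGetD_eq_getElem _ 0 (by omega) (by simp; exact_mod_cast hm)]
    simp [List.getElem_set_self]
  rw [hv]
  have hdq2 : (if a[m] + F > 0 then csPop dq (a[m] + F) ++ [a[m] + F] else csPop dq (a[m] + F))
      = skyline (((a.take m).drop (m - k.toNat)) ++ [a[m] + F]) := by
    rw [hdq, ← skyline_push ((a.take m).drop (m - k.toNat)) (a[m] + F)]
    split <;> simp
  have htake : (a.set m (a[m] + F)).take (m + 1) = a.take m ++ [a[m] + F] := by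
    rw [List.take_succ_eq_append_getElem (by simp; exact hm), List.take_set,
      List.set_eq_of_length_le (by simp)]
    congr 1
    simp [List.getElem_set_self]
  have hwin1 : ((a.take m).drop (m - k.toNat)) ++ [a[m] + F]
      = ((a.set m (a[m] + F)).take (m + 1)).drop (m - k.toNat) := by
    rw [htake, List.drop_append_of_le_length (by simp; omega)]
  refine Prod.ext rfl ?_
  dsimp only
  by_cases hge : k.toNat ≤ m
  · have hkk : (k.toNat : Int) = k := Int.toNat_of_nonneg (by omega)
    have hmk : (m : Int) ≥ k := by omega
    have he : PySem.List.pyGetD (a.set m (a[m] + F)) ((m : Int) - k) 0 = a[m - k.toNat]'(by omega) := by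
      rw [PySem.List.pyGetD_eq_getElem _ 0 (by omega) (by simp; omega),
          List.getElem_set_ne (by omega) (by simp; omega)]
      congr 1
      omega
    have hWcons : ((a.set m (a[m] + F)).take (m + 1)).drop (m - k.toNat)
        = (a[m - k.toNat]'(by omega)) :: ((a.set m (a[m] + F)).take (m + 1)).drop (m - k.toNat + 1) := by
      rw [List.drop_eq_getElem_cons (by simp; omega)]
      congr 1
      rw [List.getElem_take]
      exact List.getElem_set_ne (by omega) (by simp; omega)
    rw [hdq2, hwin1, he]
    set W' := ((a.set m (a[m] + F)).take (m + 1)).drop (m - k.toNat + 1) with hW'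
    rw [hWcons]
    have hsplit : (if ((m : Int) ≥ k ∧ skyline ((a[m - k.toNat]'(by omega)) :: W') ≠ [] ∧
          (skyline ((a[m - k.toNat]'(by omega)) :: W')).headD 0 = a[m - k.toNat]'(by omega))
        then (skyline ((a[m - k.toNat]'(by omega)) :: W')).tail
        else skyline ((a[m - k.toNat]'(by omega)) :: W'))
        = skyline W' := by
      rw [← skyline_evict (a[m - k.toNat]'(by omega)) W']
      by_cases hq : skyline ((a[m - k.toNat]'(by omega)) :: W') ≠ [] ∧
          (skyline ((a[m - k.toNat]'(by omega)) :: W')).headD 0 = a[m - k.toNat]'(by omega)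
      · rw [if_pos ⟨hmk, hq⟩, if_pos hq]
      · rw [if_neg (fun hh => hq hh.2), if_neg hq]
    rw [hsplit, hW']
    show skyline _ = skyline _
    congr 1
    show List.drop _ _ = List.drop _ _
    congr 1
    omega
  · have hkk : (k.toNat : Int) = k := Int.toNat_of_nonneg (by omega)
    rw [if_neg (by rintro ⟨h1, -⟩; omega)]
    rw [hdq2, hwin1]
    congr 2
    · omega

-- one loop iteration for any 0 ≤ k
lemma step_eq' (k : Int) (hk : 0 ≤ k) (a dq : List Int) (m : Nat) (hm : m < a.length)
    (hdq : dq = skyline ((a.take m).drop (m - k.toNat))) :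
    stepA k (a, dq) (m : Int)
      = (stepB k a (m : Int),
         skyline (((stepB k a (m : Int)).take (m + 1)).drop (m + 1 - k.toNat))) := by
  rcases (show k = 0 ∨ 1 ≤ k by omega) with h | h
  · subst h; exact step_eq_zero a dq m hm hdq
  · exact step_eq k h a dq m hm hdq

-- the whole loop: A's fold and B's fold build the same dp array
lemma fold_eq (k : Int) (hk : 0 ≤ k) :
    ∀ (cnt m : Nat) (a dq : List Int), m + cnt = a.length →
    dq = skyline ((a.take m).drop (m - k.toNat)) →
    ((PySem.List.pyRange (m : Int) (a.length : Int) 1).foldl (stepA k) (a, dq)).1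
      = (PySem.List.pyRange (m : Int) (a.length : Int) 1).foldl (stepB k) a := by
  intro cnt
  induction cnt with
  | zero =>
    intro m a dq hlen hdq
    rw [PySem.List.pyRange_one_eq_nil (by omega)]
    rfl
  | succ cnt ih =>
    intro m a dq hlen hdq
    have hm : m < a.length := by omega
    rw [PySem.List.pyRange_one_cons (by exact_mod_cast hm)]
    simp only [List.foldl_cons]
    rw [step_eq' k hk a dq m hm hdq]
    have hlenB : (stepB k a (m : Int)).length = a.length := by
      rw [stepB_spec k hk a m hm]; simp
    have h1 : ((m : Int) + 1) = ((m + 1 : Nat) : Int) := by push_cast; ring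
    have h2 : (a.length : Int) = ((stepB k a (m : Int)).length : Int) := by rw [hlenB]
    rw [h1, h2]
    exact ih (m + 1) (stepB k a (m : Int)) _ (by omega) rfl

-- ===== VERDICT (by name: the statement is the Claim_ definition above) =====
theorem constrainedSubsetSum1_spec : Claim_equal_constrainedSubsetSum1 := by
  unfold Claim_equal_constrainedSubsetSum1
  intro nums k hdom hpre
  obtain ⟨hne, hk⟩ := hpre
  unfold Spec_constrainedSubsetSum1 constrainedSubsetSum1 constrainedSubsetSum1_alt
  dsimp only
  have h := fold_eq k hk nums.length 0 nums [] (by omega) (by simp [skyline])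
  rw [Nat.cast_zero] at h
  rw [h]
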